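-- pv_equiv track=rewrite | github.com/remembra-ai/remembra | src/remembra/services/memory.py | _simple_fact_extraction
-- ===== SOURCE A (Python) =====
-- def _simple_fact_extraction(content: str) -> list[str]:
--     """
--     Simple rule-based fact extraction.
--     Splits content into sentences as basic facts.
--
--     TODO(Week 4): Replace with LLM-powered extraction.
--     """
--     # Split by sentence-ending punctuation
--     sentences = []
--     current = []
--
--     for char in content:
--         current.append(char)
--         if char in ".!?":
--             sentence = "".join(current).strip()
--             if len(sentence) > 10:  # Skip very short fragments
--                 sentences.append(sentence)
--             current = []
--
--     # Don't forget the last sentence without punctuation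
--     if current:
--         sentence = "".join(current).strip()
--         if len(sentence) > 10:
--             sentences.append(sentence)
--
--     return sentences[:10]  # Limit to 10 facts per memory
-- ===== SOURCE B (Python) =====
-- import re
--
-- def _simple_fact_extraction(content: str) -> list[str]:
--     # One regex split keeping the delimiters: even slots are the text between
--     # punctuation, odd slots the punctuation chars; pair them into chunks,
--     # the last (even) slot is the trailing fragment.
--     parts = re.split(r'([.!?])', content)
--     chunks = [parts[i] + parts[i + 1] for i in range(0, len(parts) - 1, 2)]
--     if parts[-1]:
--         chunks.append(parts[-1])
--     sentences = [s for c in chunks if len(s := c.strip()) > 10]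
--     return sentences[:10]
-- ===== Notes on version B (the rewrite author's own statement) =====
-- stated objective: idiomatic
-- what changed: Replaces A's char-by-char accumulator loop with a delimiter-keeping re.split tokenization paired back into punctuation-terminated chunks plus the trailing fragment, then a single comprehension that strips/filters and a final [:10] cap.
import Mathlib
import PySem

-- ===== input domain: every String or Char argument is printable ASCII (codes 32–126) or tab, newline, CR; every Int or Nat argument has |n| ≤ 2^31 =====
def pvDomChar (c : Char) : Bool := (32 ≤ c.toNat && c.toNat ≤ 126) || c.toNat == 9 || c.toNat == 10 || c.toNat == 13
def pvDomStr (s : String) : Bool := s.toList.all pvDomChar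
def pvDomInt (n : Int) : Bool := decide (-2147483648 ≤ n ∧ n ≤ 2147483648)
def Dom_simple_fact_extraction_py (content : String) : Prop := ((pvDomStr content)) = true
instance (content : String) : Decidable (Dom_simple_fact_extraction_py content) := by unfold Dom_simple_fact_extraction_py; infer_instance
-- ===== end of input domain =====

-- B tokenizes the text into punctuation-terminated chunks plus a trailing fragment (Python:
-- one delimiter-keeping re.split, paired back up), then filters/limits them, instead of A's
-- char-by-char accumulator loop; objective: idiomatic (same asymptotic cost).


-- ===== PORT A =====
-- A: char-by-char loop with an accumulator `current`, flushing at '.', '!', '?'.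
def pvStepA (st : List String × List Char) (c : Char) : List String × List Char :=
  let cur := st.2 ++ [c]
  if c = '.' ∨ c = '!' ∨ c = '?' then
    let s := PySem.Str.strip (String.mk cur)
    (if PySem.Str.len s > 10 then st.1 ++ [s] else st.1, [])
  else (st.1, cur)

def simple_fact_extraction_py (content : String) : List String :=
  let st := content.toList.foldl pvStepA ([], [])
  let sentences :=
    if st.2 ≠ [] then
      let s := PySem.Str.strip (String.mk st.2)
      if PySem.Str.len s > 10 then st.1 ++ [s] else st.1
    else st.1
  PySem.List.slice sentences none (some 10)

-- ===== PORT B =====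
-- hand transcription of B's tokenization: re.split(r'([.!?])', content) with the even/odd
-- slots paired back into punctuation-terminated chunks, done in one scan; returns
-- (the chunks, the trailing fragment = the last even slot).
def pvSplitP : List Char → List Char → List (List Char) × List Char
  | acc, [] => ([], acc.reverse)
  | acc, c :: cs =>
    if c = '.' ∨ c = '!' ∨ c = '?' then
      let r := pvSplitP [] cs
      ((acc.reverse ++ [c]) :: r.1, r.2)
    else pvSplitP (c :: acc) cs

def simple_fact_extraction_py_alt (content : String) : List String :=
  let pr := pvSplitP [] content.toList
  let parts := if pr.2 ≠ [] then pr.1 ++ [pr.2] else pr.1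
  let sentences := parts.filterMap (fun p =>
    let s := PySem.Str.strip (String.mk p)
    if PySem.Str.len s > 10 then some s else none)
  PySem.List.slice sentences none (some 10)

-- ===== PRECONDITION & SPEC =====
def Spec_simple_fact_extraction_py (content : String) (out : List String) : Prop := out = simple_fact_extraction_py_alt content
instance (content : String) (out : List String) : Decidable (Spec_simple_fact_extraction_py content out) := by unfold Spec_simple_fact_extraction_py; infer_instance

-- ===== CLAIM (what is proved, stated in full; the proofs are below) =====
def Claim_equal_simple_fact_extraction_py : Prop := ∀ (content : String), Dom_simple_fact_extraction_py content → Spec_simple_fact_extraction_py content (simple_fact_extraction_py content)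

-- ===== LEMMAS AND PROOFS =====
def pvF (p : List Char) : Option String :=
  let s := PySem.Str.strip (String.mk p)
  if PySem.Str.len s > 10 then some s else none

def pvRender (pr : List (List Char) × List Char) : List String :=
  (if pr.2 ≠ [] then pr.1 ++ [pr.2] else pr.1).filterMap pvF

def pvFin (st : List String × List Char) : List String :=
  if st.2 ≠ [] then st.1 ++ (pvF st.2).toList else st.1

lemma pvStepA_eq (st : List String × List Char) (c : Char) :
    pvStepA st c =
      if c = '.' ∨ c = '!' ∨ c = '?' then (st.1 ++ (pvF (st.2 ++ [c])).toList, [])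
      else (st.1, st.2 ++ [c]) := by
  simp only [pvStepA, pvF]
  split_ifs <;> simp_all

lemma pvRender_cons (p : List Char) (pr : List (List Char) × List Char) :
    pvRender (p :: pr.1, pr.2) = (pvF p).toList ++ pvRender pr := by
  simp only [pvRender]
  cases hf : pvF p <;> split_ifs <;> simp [List.filterMap_cons, List.filterMap_append, hf]

lemma pvKey : ∀ (cs cur : List Char) (sents : List String),
    pvFin (cs.foldl pvStepA (sents, cur)) = sents ++ pvRender (pvSplitP cur.reverse cs)
  | [], cur, sents => by
    simp only [List.foldl_nil, pvFin, pvSplitP, List.reverse_reverse, pvRender]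
    cases hf : pvF cur <;> split_ifs <;> simp [List.filterMap_cons, hf]
  | c :: cs, cur, sents => by
    simp only [List.foldl_cons, pvStepA_eq]
    by_cases h : c = '.' ∨ c = '!' ∨ c = '?'
    · simp only [if_pos h, pvSplitP, List.reverse_reverse]
      rw [pvKey cs [] (sents ++ (pvF (cur ++ [c])).toList)]
      have : pvRender ((cur ++ [c]) :: (pvSplitP [] cs).1, (pvSplitP [] cs).2)
          = (pvF (cur ++ [c])).toList ++ pvRender (pvSplitP [] cs) := pvRender_cons _ _
      simp only [List.reverse_nil] at *
      rw [this, List.append_assoc]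
    · simp only [if_neg h, pvSplitP]
      rw [pvKey cs (cur ++ [c]) sents]
      simp [List.reverse_append]

lemma pvA_eq_fin (content : String) :
    simple_fact_extraction_py content =
      PySem.List.slice (pvFin (content.toList.foldl pvStepA ([], []))) none (some 10) := by
  unfold simple_fact_extraction_py
  generalize content.toList.foldl pvStepA ([], []) = st
  simp only [pvFin, pvF]
  split_ifs <;> simp

lemma pvB_eq_render (content : String) :
    simple_fact_extraction_py_alt content =
      PySem.List.slice (pvRender (pvSplitP [] content.toList)) none (some 10) := by
  simp only [simple_fact_extraction_py_alt, pvRender, pvF]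

-- ===== VERDICT (by name: the statement is the Claim_ definition above) =====
theorem simple_fact_extraction_py_spec : Claim_equal_simple_fact_extraction_py := by
  intro content _
  unfold Spec_simple_fact_extraction_py
  rw [pvA_eq_fin, pvB_eq_render]
  have h := pvKey content.toList [] []
  simp only [List.reverse_nil, List.nil_append] at h
  rw [h]
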